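-- pv_equiv track=rewrite | github.com/emilyssher/insta_scraping | cuad_scraper_v2.py | grade_caption
-- ===== SOURCE A (Python) =====
-- def grade_caption(caption: str) -> int:
--     """
--     Score a post caption by topic severity (highest match wins):
--       5 — Palestine / Israel / Gaza
--       4 — Disciplinary / expulsion
--       3 — Protest / autonomous action
--       2 — CUAD / SJP / anti-zionism / anti-zionist
--       1 — Shafik / Armstrong / Shipman / Rosenbury
--       0 — none of the above
--     """
--     if not caption:
--         return 0
--     text = caption.lower()
--     TIERS = [
--         (5, ["palestine", "israel", "gaza"]),
--         (4, ["disciplinary", "expulsion", "expelled", "suspend", "suspended", "suspension"]),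
--         (3, ["protest", "autonomous action", "encampment", "demonstration", "walkout", "rally"]),
--         (2, ["cuad", "sjp", "anti-zionism", "anti-zionist", "antizionism", "antizionist"]),
--         (1, ["shafik", "armstrong", "shipman", "rosenbury"]),
--     ]
--     for score, keywords in TIERS:
--         if any(kw in text for kw in keywords):
--             return score
--     return 0
-- ===== SOURCE B (Python) =====
-- # Position-driven scan: walk the caption once, dispatch on the current character
-- # through a first-letter index, and try to match candidate keywords at that spot.
-- _BY_FIRST = {
--     "p": [("palestine", 5), ("protest", 3)],
--     "i": [("israel", 5)],
--     "g": [("gaza", 5)],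
--     "d": [("disciplinary", 4), ("demonstration", 3)],
--     "e": [("expulsion", 4), ("expelled", 4), ("encampment", 3)],
--     "s": [("suspend", 4), ("suspended", 4), ("suspension", 4), ("sjp", 2),
--           ("shafik", 1), ("shipman", 1)],
--     "a": [("autonomous action", 3), ("anti-zionism", 2), ("anti-zionist", 2),
--           ("antizionism", 2), ("antizionist", 2), ("armstrong", 1)],
--     "w": [("walkout", 3)],
--     "r": [("rally", 3), ("rosenbury", 1)],
--     "c": [("cuad", 2)],
-- }
--
--
-- def grade_caption(caption: str) -> int:
--     text = caption.lower()
--     best = 0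
--     for i in range(len(text)):
--         for kw, s in _BY_FIRST.get(text[i], []):
--             if s > best and text.startswith(kw, i):
--                 best = s
--     return best
-- ===== Notes on version B (the rewrite author's own statement) =====
-- stated objective: alternative
-- what changed: Replaces A's keyword-driven tiered substring search with early return by a position-driven single scan of the lowered caption that dispatches through a first-character index to candidate keywords, matching them in place and keeping a running best score.
import Mathlib
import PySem

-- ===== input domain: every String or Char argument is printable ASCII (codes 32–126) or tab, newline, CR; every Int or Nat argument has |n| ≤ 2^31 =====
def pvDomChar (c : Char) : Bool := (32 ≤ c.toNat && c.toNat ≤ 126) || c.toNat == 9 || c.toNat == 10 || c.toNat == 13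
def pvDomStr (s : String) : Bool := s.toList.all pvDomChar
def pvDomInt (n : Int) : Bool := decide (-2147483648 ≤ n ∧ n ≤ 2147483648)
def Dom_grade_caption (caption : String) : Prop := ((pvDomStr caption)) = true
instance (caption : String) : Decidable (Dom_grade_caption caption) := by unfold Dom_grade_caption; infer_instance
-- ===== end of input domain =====

-- B replaces A's keyword-driven tiered substring search (early return per tier) by a
-- position-driven single scan of the caption with a first-character index into the
-- candidate keywords (objective: alternative algorithm, same exact result).

-- ===== PORT A =====
def gcTiers : List (Int × List String) :=
  [ (5, ["palestine", "israel", "gaza"]),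
    (4, ["disciplinary", "expulsion", "expelled", "suspend", "suspended", "suspension"]),
    (3, ["protest", "autonomous action", "encampment", "demonstration", "walkout", "rally"]),
    (2, ["cuad", "sjp", "anti-zionism", "anti-zionist", "antizionism", "antizionist"]),
    (1, ["shafik", "armstrong", "shipman", "rosenbury"]) ]

-- the 'for score, keywords in TIERS' loop with its early return
def gcLoop (text : String) : List (Int × List String) → Int
  | [] => 0
  | (score, kws) :: rest =>
      if kws.any (fun kw => PySem.Str.isIn kw text) then score else gcLoop text rest

def grade_caption (caption : String) : Int :=
  if caption = "" then 0
  else gcLoop (PySem.Str.lower caption) gcTiers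

-- ===== PORT B =====
-- the module-level _BY_FIRST dict of Source B (keywords kept as their character lists)
def gcByFirst : PySem.Dict Char (List (List Char × Int)) := PySem.Dict.mk
  [ ('p', [("palestine".toList, 5), ("protest".toList, 3)]),
    ('i', [("israel".toList, 5)]),
    ('g', [("gaza".toList, 5)]),
    ('d', [("disciplinary".toList, 4), ("demonstration".toList, 3)]),
    ('e', [("expulsion".toList, 4), ("expelled".toList, 4), ("encampment".toList, 3)]),
    ('s', [("suspend".toList, 4), ("suspended".toList, 4), ("suspension".toList, 4),
           ("sjp".toList, 2), ("shafik".toList, 1), ("shipman".toList, 1)]),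
    ('a', [("autonomous action".toList, 3), ("anti-zionism".toList, 2), ("anti-zionist".toList, 2),
           ("antizionism".toList, 2), ("antizionist".toList, 2), ("armstrong".toList, 1)]),
    ('w', [("walkout".toList, 3)]),
    ('r', [("rally".toList, 3), ("rosenbury".toList, 1)]),
    ('c', [("cuad".toList, 2)]) ]

-- the inner 'for kw, s in _BY_FIRST.get(text[i], [])' loop (u = text[i:]; startswith(kw, i))
def gcInner (u : List Char) (cands : List (List Char × Int)) (best : Int) : Int :=
  cands.foldl (fun b p => if b < p.2 ∧ PySem.Chars.startswith u p.1 then p.2 else b) best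

-- the outer 'for i in range(len(text))' loop, as structural recursion on the suffix
def gcScan : List Char → Int → Int
  | [], best => best
  | c :: rest, best => gcScan rest (gcInner (c :: rest) (PySem.Dict.getD gcByFirst c []) best)

def grade_caption_alt (caption : String) : Int :=
  gcScan (PySem.Str.lower caption).toList 0

-- ===== PRECONDITION & SPEC =====
def Spec_grade_caption (caption : String) (out : Int) : Prop := out = grade_caption_alt caption
instance (caption : String) (out : Int) : Decidable (Spec_grade_caption caption out) := by unfold Spec_grade_caption; infer_instance

-- ===== CLAIM (what is proved, stated in full; the proofs are below) =====
def Claim_equal_grade_caption : Prop := ∀ (caption : String), Dom_grade_caption caption → Spec_grade_caption caption (grade_caption caption)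

-- ===== LEMMAS AND PROOFS =====

-- the flat keyword→score pairs, as a reference point both programs are compared to
def gcPairs : List (List Char × Int) :=
  [ ("palestine".toList, 5), ("israel".toList, 5), ("gaza".toList, 5),
    ("disciplinary".toList, 4), ("expulsion".toList, 4), ("expelled".toList, 4),
    ("suspend".toList, 4), ("suspended".toList, 4), ("suspension".toList, 4),
    ("protest".toList, 3), ("autonomous action".toList, 3), ("encampment".toList, 3),
    ("demonstration".toList, 3), ("walkout".toList, 3), ("rally".toList, 3),
    ("cuad".toList, 2), ("sjp".toList, 2), ("anti-zionism".toList, 2),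
    ("anti-zionist".toList, 2), ("antizionism".toList, 2), ("antizionist".toList, 2),
    ("shafik".toList, 1), ("armstrong".toList, 1), ("shipman".toList, 1), ("rosenbury".toList, 1) ]

-- reference value: max score over pairs whose keyword occurs in t
def gcM (t : List Char) : Int :=
  gcPairs.foldl (fun b p => if PySem.Chars.isIn p.1 t then max b p.2 else b) 0

-- ---- generic facts about the max-if fold ----
theorem gc_maxif_ge {α : Type} (P : α → Bool) (v : α → Int) (l : List α) (b : Int) :
    b ≤ l.foldl (fun acc x => if P x then max acc (v x) else acc) b := by
  induction l generalizing b with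
  | nil => simp
  | cons x xs ih =>
      simp only [List.foldl_cons]
      refine le_trans ?_ (ih _)
      split_ifs <;> simp

theorem gc_maxif_ub {α : Type} (P : α → Bool) (v : α → Int) (l : List α) (b : Int)
    (x : α) (hx : x ∈ l) (hP : P x = true) :
    v x ≤ l.foldl (fun acc y => if P y then max acc (v y) else acc) b := by
  induction l generalizing b with
  | nil => simp at hx
  | cons y ys ih =>
      simp only [List.foldl_cons]
      rcases List.mem_cons.1 hx with h | h
      · subst h
        simp only [hP, if_true]
        exact le_trans (le_max_right _ _) (gc_maxif_ge P v ys _)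
      · exact ih _ h

theorem gc_maxif_cases {α : Type} (P : α → Bool) (v : α → Int) (l : List α) (b : Int) :
    l.foldl (fun acc y => if P y then max acc (v y) else acc) b = b ∨
    ∃ x ∈ l, P x = true ∧ l.foldl (fun acc y => if P y then max acc (v y) else acc) b = v x := by
  induction l generalizing b with
  | nil => left; rfl
  | cons y ys ih =>
      simp only [List.foldl_cons]
      by_cases hP : P y = true
      · simp only [hP, if_true]
        rcases ih (max b (v y)) with h | ⟨x, hx, hPx, hval⟩
        · rcases max_cases b (v y) with ⟨hm, _⟩ | ⟨hm, _⟩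
          · left; rw [h, hm]
          · right; exact ⟨y, List.mem_cons_self .., hP, by rw [h, hm]⟩
        · right; exact ⟨x, List.mem_cons_of_mem _ hx, hPx, hval⟩
      · simp only [hP]
        rcases ih b with h | ⟨x, hx, hPx, hval⟩
        · left; exact h
        · right; exact ⟨x, List.mem_cons_of_mem _ hx, hPx, hval⟩

-- the inner fold of B is the max-if fold (pruning 's > best' folded into max)
theorem gcInner_eq (u : List Char) (cands : List (List Char × Int)) (b : Int) :
    gcInner u cands b =
      cands.foldl (fun acc p => if PySem.Chars.startswith u p.1 then max acc p.2 else acc) b := by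
  unfold gcInner
  congr 1
  funext acc p
  by_cases hs : PySem.Chars.startswith u p.1 = true
  · simp only [hs, and_true, if_true]
    rcases lt_or_ge acc p.2 with h | h
    · rw [if_pos h, max_eq_right h.le]
    · rw [if_neg (not_lt.2 h), max_eq_left h]
  · simp [hs]


-- a member of a getD-looked-up list comes from some entry of the dict
theorem gc_dict_getD_mem {κ α : Type} [BEq κ] (d : PySem.Dict κ (List α)) (c : κ) (x : α)
    (hx : x ∈ PySem.Dict.getD d c []) : ∃ kv ∈ d.items, x ∈ kv.2 := by
  unfold PySem.Dict.getD PySem.Dict.get? at hx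
  cases hf : List.find? (fun p => p.1 == c) d.items with
  | none => rw [hf] at hx; simp at hx
  | some kv =>
      rw [hf] at hx
      exact ⟨kv, List.mem_of_find?_eq_some hf, by simpa using hx⟩

-- every candidate list in the dict is a sublist of gcPairs
theorem gc_cands_sub (c : Char) (p : List Char × Int)
    (hp : p ∈ PySem.Dict.getD gcByFirst c []) : p ∈ gcPairs := by
  obtain ⟨kv, hkv, hmem⟩ := gc_dict_getD_mem gcByFirst c p hp
  have hall : ∀ kv ∈ gcByFirst.items, ∀ q ∈ kv.2, q ∈ gcPairs := by decide
  exact hall kv hkv p hmem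

-- every pair has a nonempty keyword and is registered under its first character
theorem gc_pairs_reg : ∀ p ∈ gcPairs, p.1 ≠ [] ∧ p ∈ PySem.Dict.getD gcByFirst p.1.head! [] := by
  decide

-- every pair is registered in the dict under its first character
theorem gc_pairs_cands (p : List Char × Int) (hp : p ∈ gcPairs) :
    ∃ c rest, p.1 = c :: rest ∧ p ∈ PySem.Dict.getD gcByFirst c [] := by
  obtain ⟨hne, hreg⟩ := gc_pairs_reg p hp
  cases h1 : p.1 with
  | nil => exact absurd h1 hne
  | cons c rest =>
      refine ⟨c, rest, rfl, ?_⟩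
      rw [h1] at hreg
      simpa using hreg

-- ---- characterization of gcScan ----
theorem gcScan_ge (t : List Char) (b : Int) : b ≤ gcScan t b := by
  induction t generalizing b with
  | nil => simp [gcScan]
  | cons c rest ih =>
      refine le_trans ?_ (ih _)
      rw [gcInner_eq]
      exact gc_maxif_ge _ _ _ _

theorem gcScan_ub (t : List Char) (b : Int) (p : List Char × Int) (u : List Char)
    (hu : u <:+ t) (hc : ∃ c rest, p.1 = c :: rest ∧ p ∈ PySem.Dict.getD gcByFirst c [])
    (hpre : PySem.Chars.startswith u p.1 = true) :
    p.2 ≤ gcScan t b := by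
  obtain ⟨c, tl, hp1, hpc⟩ := hc
  revert hu hpre
  revert b u
  induction t with
  | nil =>
      intro b u hu hpre
      have := (PySem.Chars.startswith_iff u p.1).1 hpre
      rw [List.suffix_nil.1 hu] at this
      rw [hp1] at this
      simp [List.prefix_nil] at this
  | cons d rest ih =>
      intro b u hu hpre
      rcases List.suffix_cons_iff.1 hu with h | h
      · -- the match is at the head position
        have hpfx := (PySem.Chars.startswith_iff u p.1).1 hpre
        have hcd : c = d := by
          obtain ⟨s, hs⟩ := hpfx
          rw [hp1, h] at hs
          simp only [List.cons_append, List.cons.injEq] at hs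
          exact hs.1
        subst hcd
        rw [gcScan]
        refine le_trans ?_ (gcScan_ge rest _)
        rw [gcInner_eq]
        refine gc_maxif_ub (fun q => PySem.Chars.startswith (c :: rest) q.1) (fun q => q.2) _ b p hpc ?_
        rwa [← h]
      · exact ih _ _ h hpre

theorem gcScan_cases (t : List Char) (b : Int) :
    gcScan t b = b ∨ ∃ p ∈ gcPairs, (∃ u, u <:+ t ∧ PySem.Chars.startswith u p.1 = true) ∧
      gcScan t b = p.2 := by
  induction t generalizing b with
  | nil => left; rfl
  | cons c rest ih =>
      rw [gcScan]
      rcases ih (gcInner (c :: rest) (PySem.Dict.getD gcByFirst c []) b) with h | ⟨p, hp, ⟨u, hu, hpre⟩, hval⟩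
      · rw [h, gcInner_eq]
        rcases gc_maxif_cases (fun q => PySem.Chars.startswith (c :: rest) q.1) (fun q => q.2)
            (PySem.Dict.getD gcByFirst c []) b with h2 | ⟨p, hp, hpre, hval⟩
        · left; exact h2
        · right
          exact ⟨p, gc_cands_sub c p hp, ⟨c :: rest, List.suffix_refl _, hpre⟩, hval⟩
      · right
        exact ⟨p, hp, ⟨u, hu.trans (List.suffix_cons c rest), hpre⟩, hval⟩

-- B computes gcM
theorem gc_alt_eq_M (t : List Char) : gcScan t 0 = gcM t := by
  refine le_antisymm ?_ ?_
  · rcases gcScan_cases t 0 with h | ⟨p, hp, ⟨u, hu, hpre⟩, hval⟩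
    · rw [h]; exact gc_maxif_ge _ _ _ _
    · rw [hval]
      have hin : PySem.Chars.isIn p.1 t = true := by
        refine (PySem.Chars.exists_prefix_drop_iff_isIn p.1 t).1 ?_
        exact ⟨t.length - u.length, by rw [← List.suffix_iff_eq_drop.1 hu]
                                       exact (PySem.Chars.startswith_iff u p.1).1 hpre⟩
      exact gc_maxif_ub (fun q => PySem.Chars.isIn q.1 t) (fun q => q.2) gcPairs 0 p hp hin
  · rcases gc_maxif_cases (fun q => PySem.Chars.isIn q.1 t) (fun q => q.2) gcPairs 0 with h | ⟨p, hp, hin, hval⟩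
    · rw [gcM, h]; exact gcScan_ge t 0
    · rw [gcM, hval]
      obtain ⟨j, hj⟩ := (PySem.Chars.exists_prefix_drop_iff_isIn p.1 t).2 hin
      exact gcScan_ub t 0 p (t.drop j) (List.drop_suffix j t) (gc_pairs_cands p hp)
        ((PySem.Chars.startswith_iff _ _).2 hj)

-- A computes gcM
-- one same-score block of the flat fold: it updates the accumulator to (max b s)
-- iff some keyword of the block occurs in t
theorem gc_blk (t : List Char) (kws : List (List Char)) (s b : Int) (rest : List (List Char × Int)) :
    List.foldl (fun best p => if PySem.Chars.isIn p.1 t then max best p.2 else best) b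
      (kws.map (fun kw => (kw, s)) ++ rest)
    = List.foldl (fun best p => if PySem.Chars.isIn p.1 t then max best p.2 else best)
        (if kws.any (fun kw => PySem.Chars.isIn kw t) then max b s else b) rest := by
  induction kws generalizing b with
  | nil => simp
  | cons k ks ih =>
      simp only [List.map_cons, List.cons_append, List.foldl_cons, List.any_cons]
      rw [ih]
      congr 1
      by_cases hk : PySem.Chars.isIn k t = true <;>
        by_cases ha : (ks.any (fun kw => PySem.Chars.isIn kw t)) = true <;>
        simp only [Bool.not_eq_true] at hk ha <;>
        simp only [hk, ha] <;> simp

theorem gc_A_eq_M (caption : String) : grade_caption caption = gcM (PySem.Chars.lower caption.toList) := by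
  by_cases h : caption = ""
  · subst h
    decide
  · set t := PySem.Chars.lower caption.toList with ht
    have hk : gcPairs =
        (["palestine".toList, "israel".toList, "gaza".toList].map (fun kw => (kw, (5 : Int)))) ++
        ((["disciplinary".toList, "expulsion".toList, "expelled".toList, "suspend".toList, "suspended".toList, "suspension".toList].map (fun kw => (kw, (4 : Int)))) ++
        ((["protest".toList, "autonomous action".toList, "encampment".toList, "demonstration".toList, "walkout".toList, "rally".toList].map (fun kw => (kw, (3 : Int)))) ++
        ((["cuad".toList, "sjp".toList, "anti-zionism".toList, "anti-zionist".toList, "antizionism".toList, "antizionist".toList].map (fun kw => (kw, (2 : Int)))) ++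
        ((["shafik".toList, "armstrong".toList, "shipman".toList, "rosenbury".toList].map (fun kw => (kw, (1 : Int)))) ++ [])))) := by
      rfl
    rw [gcM, hk, gc_blk, gc_blk, gc_blk, gc_blk, gc_blk, List.foldl_nil]
    rw [grade_caption, if_neg h]
    simp only [gcTiers, gcLoop]
    cases h5 : List.any ["palestine".toList, "israel".toList, "gaza".toList] (fun kw => PySem.Chars.isIn kw t) <;>
    cases h4 : List.any ["disciplinary".toList, "expulsion".toList, "expelled".toList, "suspend".toList, "suspended".toList, "suspension".toList] (fun kw => PySem.Chars.isIn kw t) <;>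
    cases h3 : List.any ["protest".toList, "autonomous action".toList, "encampment".toList, "demonstration".toList, "walkout".toList, "rally".toList] (fun kw => PySem.Chars.isIn kw t) <;>
    cases h2 : List.any ["cuad".toList, "sjp".toList, "anti-zionism".toList, "anti-zionist".toList, "antizionism".toList, "antizionist".toList] (fun kw => PySem.Chars.isIn kw t) <;>
    cases h1 : List.any ["shafik".toList, "armstrong".toList, "shipman".toList, "rosenbury".toList] (fun kw => PySem.Chars.isIn kw t) <;>
    simp_all [PySem.Str.isIn_eq, PySem.Str.toList_lower]

-- ===== VERDICT (by name: the statement is the Claim_ definition above) =====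
theorem grade_caption_spec : Claim_equal_grade_caption := by
  intro caption _
  unfold Spec_grade_caption
  rw [grade_caption_alt]
  rw [PySem.Str.toList_lower, gc_alt_eq_M, gc_A_eq_M]
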